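-- pv_equiv track=rewrite | github.com/Lunik/adventofcode | adventofcode/solutions/y2023/d08/part2.py | solve
-- ===== SOURCE A (Python) =====
-- import math
--
-- def not_need_more_to_resolve(steps_to_end):
--     for step in steps_to_end:
--         if step == -1:
--             return False
--
--     return True
--
-- def solve(sequence, data):
--     steps = 0
--
--     currents = list(filter(lambda x: x[-1] == "A", data.keys()))
--     steps_to_end = [-1] * len(currents)
--     while not not_need_more_to_resolve(steps_to_end):
--         step_orientation = sequence[steps % len(sequence)]
--         for index, current in enumerate(currents):
--             if steps_to_end[index] != -1:
--                 continue
--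
--             if step_orientation == "L":
--                 currents[index] = data[current][0]
--             elif step_orientation == "R":
--                 currents[index] = data[current][1]
--
--             if currents[index][-1] == "Z":
--                 steps_to_end[index] = steps + 1
--
--         steps += 1
--
--     lcm = steps_to_end[0]
--     for n in steps_to_end[1:]:
--         lcm = math.lcm(lcm, n)
--
--     return lcm
-- ===== SOURCE B (Python) =====
-- import math
--
-- def solve(sequence, data):
--     counts = []
--     for node in data.keys():
--         if node[-1] != "A":
--             continue
--         step = 0
--         cur = node
--         while True:
--             orientation = sequence[step % len(sequence)]
--             if orientation == "L":
--                 cur = data[cur][0]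
--             elif orientation == "R":
--                 cur = data[cur][1]
--             step += 1
--             if cur[-1] == "Z":
--                 counts.append(step)
--                 break
--     result = counts[0]
--     for n in counts[1:]:
--         result = math.lcm(result, n)
--     return result
-- ===== Notes on version B (the rewrite author's own statement) =====
-- stated objective: simpler
-- what changed: A advances all ghosts in lockstep inside one while-loop, tracking per-ghost done flags in a steps_to_end array; B simulates each ghost independently to its first Z-node in its own loop and folds the step counts with math.lcm, removing the shared counter and the done-flag bookkeeping.
import Mathlib
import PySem

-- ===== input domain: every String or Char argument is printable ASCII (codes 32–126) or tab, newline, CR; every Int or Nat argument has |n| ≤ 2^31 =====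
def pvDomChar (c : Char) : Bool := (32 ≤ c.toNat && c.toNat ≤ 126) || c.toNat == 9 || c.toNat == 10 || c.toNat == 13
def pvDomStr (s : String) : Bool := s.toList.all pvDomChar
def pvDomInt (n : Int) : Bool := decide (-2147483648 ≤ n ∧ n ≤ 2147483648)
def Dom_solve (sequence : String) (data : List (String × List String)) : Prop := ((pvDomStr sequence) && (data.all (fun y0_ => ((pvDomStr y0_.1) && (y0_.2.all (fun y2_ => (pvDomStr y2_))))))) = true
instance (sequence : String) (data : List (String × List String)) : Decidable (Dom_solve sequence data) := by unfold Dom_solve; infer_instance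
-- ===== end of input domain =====

-- B replaces A's lockstep simulation of all ghosts (shared step counter + done-flag array)
-- by one independent loop per ghost, then folds the per-ghost counts with lcm (objective: simpler).

-- ===== PORT A =====
-- A's helper not_need_more_to_resolve
def notNeedMoreToResolve : List Int → Bool
  | [] => true
  | s :: ss => if s == -1 then false else notNeedMoreToResolve ss

-- A's inner 'for index, current in enumerate(currents)' loop: elementwise update of
-- currents / steps_to_end (each iteration touches only its own index)
def solveInner (orient : Option Char) (d : PySem.Dict String (List String)) (stepsP1 : Int) :
    List String → List Int → List String × List Int
  | [], _ => ([], [])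
  | _ :: _, [] => ([], [])
  | c :: cs, s :: ss =>
    let rest := solveInner orient d stepsP1 cs ss
    if s ≠ -1 then (c :: rest.1, s :: rest.2)
    else
      let c' := if orient == some 'L' then (d.getD c []).getD 0 ""
                else if orient == some 'R' then (d.getD c []).getD 1 ""
                else c
      if PySem.Str.pyGet? c' (-1) == some 'Z' then (c' :: rest.1, stepsP1 :: rest.2)
      else (c' :: rest.1, s :: rest.2)

-- A's while loop; fuel is only a totality guard (under Pre_ the loop ends before fuel runs out)
def solveLoop (sequence : String) (d : PySem.Dict String (List String)) :
    Nat → Int → List String → List Int → List Int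
  | 0, _, _, ste => ste
  | f + 1, steps, currents, ste =>
    if notNeedMoreToResolve ste then ste
    else
      let orient := PySem.Str.pyGet? sequence (PySem.Int.mod steps (PySem.Str.len sequence))
      let r := solveInner orient d (steps + 1) currents ste
      solveLoop sequence d f (steps + 1) r.1 r.2

def solve (sequence : String) (data : List (String × List String)) : Int :=
  let d := PySem.Dict.ofList data
  let currents := (PySem.Dict.keys d).filter (fun x => PySem.Str.pyGet? x (-1) == some 'A')
  let ste := List.replicate currents.length (-1 : Int)
  let res := solveLoop sequence d (sequence.toList.length * (data.length + 1) + 1) 0 currents ste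
  match res with
  | [] => 0   -- Python raises IndexError at steps_to_end[0] (excluded by Pre_)
  | h :: t => t.foldl (fun a n => (Int.lcm a n : Int)) h

-- ===== PORT B =====
-- one ghost, simulated on its own until its node ends in 'Z'; fuel only a totality guard
def solveGhost (sequence : String) (d : PySem.Dict String (List String)) :
    Nat → Int → String → Int
  | 0, _, _ => -1   -- unreachable under Pre_ (Python's loop would still be running)
  | f + 1, step, cur =>
    let orient := PySem.Str.pyGet? sequence (PySem.Int.mod step (PySem.Str.len sequence))
    let cur' := if orient == some 'L' then (d.getD cur []).getD 0 ""
                else if orient == some 'R' then (d.getD cur []).getD 1 ""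
                else cur
    if PySem.Str.pyGet? cur' (-1) == some 'Z' then step + 1
    else solveGhost sequence d f (step + 1) cur'

def solve_alt (sequence : String) (data : List (String × List String)) : Int :=
  let d := PySem.Dict.ofList data
  let counts := ((PySem.Dict.keys d).filter (fun x => PySem.Str.pyGet? x (-1) == some 'A')).map
      (solveGhost sequence d (sequence.toList.length * (data.length + 1) + 1) 0)
  match counts with
  | [] => 0   -- Python raises IndexError at counts[0] (excluded by Pre_)
  | h :: t => t.foldl (fun a n => (Int.lcm a n : Int)) h

-- ===== PRECONDITION & SPEC =====
-- spec-side trajectory of one ghost (independent of both ports)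
def pvStep (sequence : String) (d : PySem.Dict String (List String)) (t : Nat) (node : String) : String :=
  let c := sequence.toList.getD (t % sequence.toList.length) ' '
  if c = 'L' then (d.getD node []).getD 0 node
  else if c = 'R' then (d.getD node []).getD 1 node
  else node

def pvTraj (sequence : String) (d : PySem.Dict String (List String)) (node : String) : Nat → String
  | 0 => node
  | t + 1 => pvStep sequence d t (pvTraj sequence d node t)

-- at tick t the Python performs data[node][0/1] without raising
def pvSafe (sequence : String) (d : PySem.Dict String (List String)) (t : Nat) (node : String) : Prop :=
  let c := sequence.toList.getD (t % sequence.toList.length) ' '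
  (c = 'L' → (d.get? node).isSome ∧ 1 ≤ (d.getD node []).length) ∧
  (c = 'R' → (d.get? node).isSome ∧ 2 ≤ (d.getD node []).length)

def pvStarts (data : List (String × List String)) : List String :=
  (PySem.Dict.keys (PySem.Dict.ofList data)).filter (fun x => x.toList.getLast? = some 'A')

-- Pre_solve = exactly where Python A returns: nonempty instruction string, all key names
-- nonempty (the filter's x[-1] raises on ""), at least one start node, and every ghost
-- reaches a nonempty node ending in 'Z' (within |sequence|*(|data|+1) ticks, which
-- pigeonhole guarantees whenever the run terminates at all) with every lookup and every
-- visited node's [-1] test on the way succeeding.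
def Pre_solve (sequence : String) (data : List (String × List String)) : Prop :=
  sequence.toList ≠ [] ∧
  (∀ p ∈ data, p.1.toList ≠ []) ∧
  pvStarts data ≠ [] ∧
  ∀ g ∈ pvStarts data,
    ∃ k < sequence.toList.length * (data.length + 1) + 1,
      (pvTraj sequence (PySem.Dict.ofList data) g (k + 1)).toList.getLast? = some 'Z' ∧
      ∀ j ≤ k, pvSafe sequence (PySem.Dict.ofList data) j (pvTraj sequence (PySem.Dict.ofList data) g j) ∧
        (pvTraj sequence (PySem.Dict.ofList data) g (j + 1)).toList ≠ []
instance (sequence : String) (data : List (String × List String)) : Decidable (Pre_solve sequence data) := by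
  unfold Pre_solve pvSafe; infer_instance

def pvWitness_solve : String × (List (String × List String)) :=
  ("L", [("AA", ["AZ", "AZ"]), ("AZ", ["AA", "AA"])])

def Spec_solve (sequence : String) (data : List (String × List String)) (out : Int) : Prop := out = solve_alt sequence data
instance (sequence : String) (data : List (String × List String)) (out : Int) : Decidable (Spec_solve sequence data out) := by unfold Spec_solve; infer_instance

-- ===== CLAIM (what is proved, stated in full; the proofs are below) =====
def Claim_equal_solve : Prop := ∀ (sequence : String) (data : List (String × List String)), Dom_solve sequence data → Pre_solve sequence data → Spec_solve sequence data (solve sequence data)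

-- ===== LEMMAS AND PROOFS =====

theorem pvZip_snd : ∀ (cur : List String) (ste : List Int), cur.length = ste.length →
    List.zipWith (fun (_ : String) (s : Int) => s) cur ste = ste := by
  intro cur
  induction cur with
  | nil => intro ste h; cases ste <;> simp_all
  | cons c cs ih =>
    intro ste h
    cases ste with
    | nil => simp at h
    | cons s ss => simp [ih ss (by simpa using h)]

-- zipWith with the freeze-function collapses to ste when no entry is -1
theorem pvZip_frozen (g : String → Int) :
    ∀ (cur : List String) (ste : List Int), cur.length = ste.length →
      (∀ s ∈ ste, s ≠ -1) →
      List.zipWith (fun c s => if s = -1 then g c else s) cur ste = ste := by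
  intro cur
  induction cur with
  | nil => intro ste h _; cases ste <;> simp_all
  | cons c cs ih =>
    intro ste h hmem
    cases ste with
    | nil => simp at h
    | cons s ss =>
      have hs : s ≠ -1 := hmem s (by simp)
      simp [List.zipWith, hs, ih ss (by simpa using h) (fun x hx => hmem x (by simp [hx]))]

theorem pvNotNeedMore_mem : ∀ (ste : List Int), notNeedMoreToResolve ste = true → ∀ s ∈ ste, s ≠ -1 := by
  intro ste
  induction ste with
  | nil => simp
  | cons s ss ih =>
    intro h x hx
    by_cases hs : s == -1
    · simp [notNeedMoreToResolve, hs] at h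
    · rcases List.mem_cons.mp hx with rfl | hx'
      · simpa using hs
      · exact ih (by simpa [notNeedMoreToResolve, hs] using h) x hx'

theorem pvInner_len (o : Option Char) (d : PySem.Dict String (List String)) (p : Int) :
    ∀ (cur : List String) (ste : List Int), cur.length = ste.length →
      (solveInner o d p cur ste).1.length = (solveInner o d p cur ste).2.length := by
  intro cur
  induction cur with
  | nil => intro ste _; simp [solveInner]
  | cons c cs ih =>
    intro ste h
    cases ste with
    | nil => simp at h
    | cons s ss =>
      have := ih ss (by simpa using h)
      by_cases hs : s ≠ -1
      · simpa [solveInner, hs] using this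
      · simp only [solveInner, if_neg hs]
        repeat' split
        all_goals simpa using this

-- one tick of A's inner loop, seen through the freeze-zip, is one unfolding of B's ghost loop
theorem pvInner_zip (sequence : String) (d : PySem.Dict String (List String))
    (f : Nat) (steps : Int) (hs : 0 ≤ steps) :
    ∀ (cur : List String) (ste : List Int), cur.length = ste.length →
      List.zipWith (fun c s => if s = -1 then solveGhost sequence d f (steps + 1) c else s)
        (solveInner (PySem.Str.pyGet? sequence (PySem.Int.mod steps (PySem.Str.len sequence))) d (steps + 1) cur ste).1
        (solveInner (PySem.Str.pyGet? sequence (PySem.Int.mod steps (PySem.Str.len sequence))) d (steps + 1) cur ste).2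
      = List.zipWith (fun c s => if s = -1 then solveGhost sequence d (f + 1) steps c else s) cur ste := by
  intro cur
  induction cur with
  | nil => intro ste _; simp [solveInner]
  | cons c cs ih =>
    intro ste h
    cases ste with
    | nil => simp at h
    | cons s ss =>
      have ihs := ih ss (by simpa using h)
      by_cases hne : s ≠ -1
      · simp only [solveInner, if_pos hne, List.zipWith, if_neg (by simpa using hne)]
        rw [ihs]
      · have hseq : s = -1 := by omega
        subst hseq
        simp only [solveInner, if_neg hne]
        set c' := if (PySem.Str.pyGet? sequence (PySem.Int.mod steps (PySem.Str.len sequence))) == some 'L' then (d.getD c []).getD 0 ""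
                  else if (PySem.Str.pyGet? sequence (PySem.Int.mod steps (PySem.Str.len sequence))) == some 'R' then (d.getD c []).getD 1 ""
                  else c with hc'
        by_cases hz : PySem.Str.pyGet? c' (-1) == some 'Z'
        · simp only [if_pos hz, List.zipWith]
          rw [ihs]
          have h1 : ¬ (steps + 1 = -1) := by omega
          have h2 : solveGhost sequence d (f + 1) steps c = steps + 1 := by
            simp only [solveGhost, ← hc', if_pos hz]
          simp [h1, h2]
        · simp only [if_neg hz, List.zipWith]
          rw [ihs]
          have h2 : solveGhost sequence d (f + 1) steps c = solveGhost sequence d f (steps + 1) c' := by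
            simp only [solveGhost, ← hc', if_neg hz]
          simp [h2]

-- A's whole while-loop equals per-ghost simulation with the same fuel (unconditionally)
theorem pvLoop_eq (sequence : String) (d : PySem.Dict String (List String)) :
    ∀ (f : Nat) (steps : Int), 0 ≤ steps → ∀ (cur : List String) (ste : List Int), cur.length = ste.length →
      solveLoop sequence d f steps cur ste
      = List.zipWith (fun c s => if s = -1 then solveGhost sequence d f steps c else s) cur ste := by
  intro f
  induction f with
  | zero =>
    intro steps _ cur ste h
    have hfun : (fun (c : String) (s : Int) => if s = -1 then solveGhost sequence d 0 steps c else s)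
         = fun _ s => s := by
      funext c s; by_cases hs : s = -1 <;> simp [hs, solveGhost]
    simp only [solveLoop, hfun, pvZip_snd cur ste h]
  | succ f ihf =>
    intro steps hsteps cur ste h
    by_cases hdone : notNeedMoreToResolve ste = true
    · rw [show solveLoop sequence d (f + 1) steps cur ste = ste by simp [solveLoop, hdone]]
      exact (pvZip_frozen _ cur ste h (pvNotNeedMore_mem ste hdone)).symm
    · have hloop : solveLoop sequence d (f + 1) steps cur ste
        = solveLoop sequence d f (steps + 1)
            (solveInner (PySem.Str.pyGet? sequence (PySem.Int.mod steps (PySem.Str.len sequence))) d (steps + 1) cur ste).1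
            (solveInner (PySem.Str.pyGet? sequence (PySem.Int.mod steps (PySem.Str.len sequence))) d (steps + 1) cur ste).2 := by
        simp [solveLoop, hdone]
      rw [hloop, ihf (steps + 1) (by omega) _ _ (pvInner_len _ _ _ cur ste h), pvInner_zip sequence d f steps hsteps cur ste h]

theorem pvZip_replicate (g : String → Int) :
    ∀ (cur : List String),
      List.zipWith (fun c s => if s = -1 then g c else s) cur (List.replicate cur.length (-1)) = cur.map g := by
  intro cur
  induction cur with
  | nil => simp
  | cons c cs ih => simp [List.replicate, ih]

-- ===== VERDICT (by name: the statement is the Claim_ definition above) =====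
theorem solve_spec : Claim_equal_solve := by
  intro sequence data _ _
  unfold Spec_solve
  simp only [solve, solve_alt]
  rw [pvLoop_eq sequence (PySem.Dict.ofList data) _ 0 (by omega) _ _ (by simp),
    pvZip_replicate]
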